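-- pv_equiv track=rewrite | github.com/jhunkeler/jwst | jwst/helpers/utils.py | word_precision_check
-- ===== SOURCE A (Python) =====
-- def word_precision_check(str1, str2, length=5):
--     """Check to strings word-by-word based for word length
--
--     The strings are checked word for word, but only for the first
--     `length` characters
--
--     Parameters
--     ----------
--     str1, str2: str
--         The strings to compare
--
--     length: int
--         The number of characters in each word to check.
--
--     Returns
--     -------
--     match: boolean
--         True if the strings match
--     """
--     words1 = str1.split()
--     words2 = str2.split()
--     if len(words1) != len(words2):
--         return False
--     for w1, w2 in zip(words1, words2):
--         if w1[:length] != w2[:length]: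
--             break
--     else:
--         return True
--     return False
-- ===== SOURCE B (Python) =====
-- def word_precision_check(str1, str2, length=5):
--     """Streaming two-pointer scan: walk both strings in lockstep, locating one
--     word at a time by index, without ever building the word lists."""
--     i, j, n, m = 0, 0, len(str1), len(str2)
--     while True:
--         while i < n and str1[i].isspace():
--             i += 1
--         while j < m and str2[j].isspace():
--             j += 1
--         if i == n or j == m:
--             return i == n and j == m
--         e1 = i
--         while e1 < n and not str1[e1].isspace():
--             e1 += 1
--         e2 = j
--         while e2 < m and not str2[e2].isspace():
--             e2 += 1
--         if str1[i:e1][:length] != str2[j:e2][:length]: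
--             return False
--         i, j = e1, e2
-- ===== Notes on version B (the rewrite author's own statement) =====
-- stated objective: alternative
-- what changed: B never calls split() or builds word lists: it walks both strings in lockstep with index pointers, skipping whitespace and delimiting one word of each string at a time, comparing their first-length slices and bailing out early.
import Mathlib
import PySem

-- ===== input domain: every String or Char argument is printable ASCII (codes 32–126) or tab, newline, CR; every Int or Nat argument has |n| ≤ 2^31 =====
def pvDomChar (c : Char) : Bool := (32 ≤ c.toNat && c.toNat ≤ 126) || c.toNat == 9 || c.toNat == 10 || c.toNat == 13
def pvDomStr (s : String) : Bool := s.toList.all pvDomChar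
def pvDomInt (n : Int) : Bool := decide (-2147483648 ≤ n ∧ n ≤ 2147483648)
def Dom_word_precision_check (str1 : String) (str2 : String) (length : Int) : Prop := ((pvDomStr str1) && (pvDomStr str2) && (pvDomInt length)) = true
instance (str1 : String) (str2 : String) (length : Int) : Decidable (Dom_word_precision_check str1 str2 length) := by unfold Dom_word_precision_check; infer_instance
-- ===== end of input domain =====

-- B replaces A's split-into-word-lists + length guard + pairwise zip loop by a streaming
-- two-pointer scan that locates and compares one word of each string at a time (objective: alternative).

-- ===== PORT A =====
-- the for/else loop over zip(words1, words2): break on a mismatch (→ false), else → true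
def wpcLoop (length : Int) : List (String × String) → Bool
  | [] => true
  | (w1, w2) :: rest =>
      if PySem.Str.slice w1 none (some length) ≠ PySem.Str.slice w2 none (some length) then false
      else wpcLoop length rest

def word_precision_check (str1 : String) (str2 : String) (length : Int) : Bool :=
  let words1 := PySem.Str.split₀ str1
  let words2 := PySem.Str.split₀ str2
  if words1.length ≠ words2.length then false
  else wpcLoop length (words1.zip words2)

-- ===== PORT B =====
-- 'while i < n and str1[i].isspace(): i += 1' — advancing the pointer = dropping the head of the remaining suffix
def wpcSkipWs : List Char → List Char
  | [] => []
  | c :: r => if PySem.Chars.isspace c then wpcSkipWs r else c :: r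

-- 'e = i; while e < n and not str[e].isspace(): e += 1' and the word str[i:e] it delimits,
-- returned together with the remaining suffix (the pointer e)
def wpcNextWord : List Char → List Char × List Char
  | [] => ([], [])
  | c :: r =>
      if PySem.Chars.isspace c then ([], c :: r)
      else
        let p := wpcNextWord r
        (c :: p.1, p.2)

-- termination of the outer while loop: each iteration consumes at least one character
theorem wpcNextWord_snd_le (s : List Char) : (wpcNextWord s).2.length ≤ s.length := by
  induction s with
  | nil => simp [wpcNextWord]
  | cons c r ih =>
      by_cases h : PySem.Chars.isspace c
      · simp [wpcNextWord, h]
      · simp only [wpcNextWord, h, Bool.false_eq_true, if_false, List.length_cons]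
        omega

theorem wpc_term (s : List Char) (h : (wpcSkipWs s).isEmpty = false) :
    (wpcNextWord (wpcSkipWs s)).2.length < s.length := by
  induction s with
  | nil => simp [wpcSkipWs] at h
  | cons c r ih =>
      by_cases hc : PySem.Chars.isspace c
      · have := ih (by simpa [wpcSkipWs, hc] using h)
        simp only [wpcSkipWs, hc, if_pos, List.length_cons]
        omega
      · simp only [wpcSkipWs, hc, Bool.false_eq_true, if_false, wpcNextWord, List.length_cons]
        have := wpcNextWord_snd_le r
        omega

-- the outer 'while True' loop: skip whitespace on both sides, compare the next words, advance
def wpcScan (length : Int) (s1 s2 : List Char) : Bool :=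
  let t1 := wpcSkipWs s1
  let t2 := wpcSkipWs s2
  if t1.isEmpty || t2.isEmpty then t1.isEmpty && t2.isEmpty
  else
    let p1 := wpcNextWord t1
    let p2 := wpcNextWord t2
    if PySem.Chars.slice p1.1 none (some length) ≠ PySem.Chars.slice p2.1 none (some length) then
      false
    else
      wpcScan length p1.2 p2.2
termination_by s1.length
decreasing_by
  refine wpc_term s1 ?_
  simp_all
  rename_i hg _
  exact hg.1

def word_precision_check_alt (str1 : String) (str2 : String) (length : Int) : Bool :=
  wpcScan length str1.toList str2.toList

-- ===== PRECONDITION & SPEC =====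
def Spec_word_precision_check (str1 : String) (str2 : String) (length : Int) (out : Bool) : Prop := out = word_precision_check_alt str1 str2 length
instance (str1 : String) (str2 : String) (length : Int) (out : Bool) : Decidable (Spec_word_precision_check str1 str2 length out) := by unfold Spec_word_precision_check; infer_instance

-- ===== CLAIM (what is proved, stated in full; the proofs are below) =====
def Claim_equal_word_precision_check : Prop := ∀ (str1 : String) (str2 : String) (length : Int), Dom_word_precision_check str1 str2 length → Spec_word_precision_check str1 str2 length (word_precision_check str1 str2 length)

-- ===== LEMMAS AND PROOFS =====

-- specification-level word list of a string, phrased with B's scanners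
def wordsList (s : List Char) : List (List Char) :=
  let t := wpcSkipWs s
  if h : t.isEmpty then []
  else (wpcNextWord t).1 :: wordsList (wpcNextWord t).2
termination_by s.length
decreasing_by
  refine wpc_term s ?_
  simp_all
  exact h

theorem wordsList_nil : wordsList [] = [] := by rw [wordsList]; simp [wpcSkipWs]

theorem wordsList_cons_space {c : Char} {r : List Char} (hc : PySem.Chars.isspace c) :
    wordsList (c :: r) = wordsList r := by
  conv_lhs => rw [wordsList]
  conv_rhs => rw [wordsList]
  simp [wpcSkipWs, hc]

theorem wordsList_cons_nonspace {c : Char} {r : List Char} (hc : ¬ PySem.Chars.isspace c) :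
    wordsList (c :: r) = (wpcNextWord (c :: r)).1 :: wordsList (wpcNextWord (c :: r)).2 := by
  rw [wordsList]; simp [wpcSkipWs, hc]

theorem wordsList_eq (s : List Char) :
    wordsList s = if wpcSkipWs s = [] then []
      else (wpcNextWord (wpcSkipWs s)).1 :: wordsList (wpcNextWord (wpcSkipWs s)).2 := by
  rw [wordsList]
  simp [List.isEmpty_iff]

-- A's for/else loop with the length guard is the equality of the truncated-word lists
theorem wpc_key (length : Int) : ∀ (xs ys : List String),
    (if xs.length ≠ ys.length then false else wpcLoop length (xs.zip ys))
      = ((xs.map (fun w => PySem.Str.slice w none (some length)))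
          == (ys.map (fun w => PySem.Str.slice w none (some length)))) := by
  intro xs
  induction xs with
  | nil =>
    intro ys; cases ys <;> simp [wpcLoop]
  | cons x xs ih =>
    intro ys
    cases ys with
    | nil => simp
    | cons y ys =>
      have h := ih ys
      by_cases hl : xs.length = ys.length
      · by_cases he : PySem.Str.slice x none (some length) = PySem.Str.slice y none (some length)
        · simpa [wpcLoop, hl, he] using h
        · simp [wpcLoop, hl, he]
      · have : (xs.map (fun w => PySem.Str.slice w none (some length)))
            ≠ (ys.map (fun w => PySem.Str.slice w none (some length))) := by
          intro hc
          exact hl (by simpa using congrArg List.length hc)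
        simp [hl, this]

-- split₀'s accumulator loop produces exactly the wordsList decomposition
theorem go_spec : ∀ (s cur : List Char) (accs : List (List Char)),
    PySem.Chars.split₀.go s cur accs
      = accs.reverse ++ (if cur.isEmpty then wordsList s
          else (cur.reverse ++ (wpcNextWord s).1) :: wordsList (wpcNextWord s).2) := by
  intro s
  induction s with
  | nil =>
      intro cur accs
      by_cases h : cur.isEmpty
      · simp [PySem.Chars.split₀.go, h, wordsList_nil]
      · simp [PySem.Chars.split₀.go, h, wordsList_nil, wpcNextWord]
  | cons c r ih =>
      intro cur accs
      by_cases hc : PySem.Chars.isspace c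
      · by_cases h : cur.isEmpty
        · simp [PySem.Chars.split₀.go, hc, h, ih, wordsList_cons_space hc]
        · simp [PySem.Chars.split₀.go, hc, h, ih, wordsList_cons_space hc, wpcNextWord]
      · by_cases h : cur.isEmpty
        · have he : cur = [] := by simpa [List.isEmpty_iff] using h
          simp [PySem.Chars.split₀.go, hc, ih, wordsList_cons_nonspace hc, wpcNextWord, he]
        · simp [PySem.Chars.split₀.go, hc, h, ih, wordsList_cons_nonspace hc, wpcNextWord]

theorem split₀_eq_wordsList (s : List Char) : PySem.Chars.split₀ s = wordsList s := by
  simpa using go_spec s [] []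

-- B's scan is the equality of the truncated wordsLists
theorem wpcScan_eq (length : Int) (s1 s2 : List Char) :
    wpcScan length s1 s2
      = ((wordsList s1).map (fun w => PySem.Chars.slice w none (some length))
          == (wordsList s2).map (fun w => PySem.Chars.slice w none (some length))) := by
  fun_induction wpcScan length s1 s2 with
  | case1 s1 s2 t1 t2 hor =>
      have ht1 : t1 = wpcSkipWs s1 := rfl
      have ht2 : t2 = wpcSkipWs s2 := rfl
      rw [ht1, ht2] at hor ⊢
      rw [wordsList_eq s1, wordsList_eq s2]
      by_cases h1 : wpcSkipWs s1 = [] <;> by_cases h2 : wpcSkipWs s2 = [] <;>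
        simp_all
  | case2 s1 s2 t1 t2 hor p1 p2 hne =>
      have ht1 : t1 = wpcSkipWs s1 := rfl
      have ht2 : t2 = wpcSkipWs s2 := rfl
      have hp1 : p1 = wpcNextWord (wpcSkipWs s1) := rfl
      have hp2 : p2 = wpcNextWord (wpcSkipWs s2) := rfl
      rw [ht1, ht2] at hor
      rw [hp1, hp2] at hne
      rw [wordsList_eq s1, wordsList_eq s2]
      by_cases h1 : wpcSkipWs s1 = [] <;> by_cases h2 : wpcSkipWs s2 = [] <;>
        simp_all [List.cons_beq_cons]
  | case3 s1 s2 t1 t2 hor p1 p2 heq ih =>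
      have ht1 : t1 = wpcSkipWs s1 := rfl
      have ht2 : t2 = wpcSkipWs s2 := rfl
      have hp1 : p1 = wpcNextWord (wpcSkipWs s1) := rfl
      have hp2 : p2 = wpcNextWord (wpcSkipWs s2) := rfl
      rw [ht1, ht2] at hor
      rw [hp1, hp2] at heq ih ⊢
      rw [wordsList_eq s1, wordsList_eq s2]
      by_cases h1 : wpcSkipWs s1 = [] <;> by_cases h2 : wpcSkipWs s2 = [] <;>
        simp_all [List.cons_beq_cons]

theorem map_ofList_beq (a b : List (List Char)) :
    (a.map String.ofList == b.map String.ofList) = (a == b) := by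
  by_cases h : a = b
  · simp [h]
  · have hm : a.map String.ofList ≠ b.map String.ofList := by
      intro hc
      exact h (List.map_injective_iff.mpr (fun _ _ => String.ofList_inj.mp) hc)
    rw [beq_eq_false_iff_ne.mpr hm, beq_eq_false_iff_ne.mpr h]

theorem split₀_trunc (length : Int) (s : String) :
    (PySem.Str.split₀ s).map (fun w => PySem.Str.slice w none (some length))
      = ((wordsList s.toList).map (fun w => PySem.Chars.slice w none (some length))).map String.ofList := by
  rw [PySem.Str.split₀, split₀_eq_wordsList]
  simp [PySem.Str.slice, List.map_map, Function.comp]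

-- ===== VERDICT (by name: the statement is the Claim_ definition above) =====
theorem word_precision_check_spec : Claim_equal_word_precision_check := by
  intro str1 str2 length _
  unfold Spec_word_precision_check
  have hA : word_precision_check str1 str2 length
      = ((PySem.Str.split₀ str1).map (fun w => PySem.Str.slice w none (some length))
          == (PySem.Str.split₀ str2).map (fun w => PySem.Str.slice w none (some length))) :=
    wpc_key length _ _
  rw [hA, split₀_trunc, split₀_trunc, map_ofList_beq]
  unfold word_precision_check_alt
  rw [wpcScan_eq]
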